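-- pv_equiv track=rewrite | github.com/YashAwaghate/chess-to-pgn | scripts/eval_temporal_tracker.py | count_correct
-- ===== SOURCE A (Python) =====
-- def count_correct(detected, gt):
--     """Align detected moves to GT (skipping GT Nones), count SAN matches."""
--     gi = di = c = 0
--     while gi < len(gt) and di < len(detected):
--         if gt[gi] is None:
--             gi += 1; continue
--         if detected[di] == gt[gi]:
--             c += 1
--         gi += 1; di += 1
--     return c
-- ===== SOURCE B (Python) =====
-- def count_correct(detected, gt):
--     """Align detected moves to GT (skipping GT Nones), count SAN matches."""
--     filtered = [g for g in gt if g is not None]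
--     return sum(1 for d, g in zip(detected, filtered) if d == g)
-- ===== Notes on version B (the rewrite author's own statement) =====
-- stated objective: simpler
-- what changed: Replaces the interleaved two-index while loop with two separately-shaped passes: filter the non-None GT entries into a list, then count equal pairs over zip(detected, filtered).
import Mathlib
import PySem

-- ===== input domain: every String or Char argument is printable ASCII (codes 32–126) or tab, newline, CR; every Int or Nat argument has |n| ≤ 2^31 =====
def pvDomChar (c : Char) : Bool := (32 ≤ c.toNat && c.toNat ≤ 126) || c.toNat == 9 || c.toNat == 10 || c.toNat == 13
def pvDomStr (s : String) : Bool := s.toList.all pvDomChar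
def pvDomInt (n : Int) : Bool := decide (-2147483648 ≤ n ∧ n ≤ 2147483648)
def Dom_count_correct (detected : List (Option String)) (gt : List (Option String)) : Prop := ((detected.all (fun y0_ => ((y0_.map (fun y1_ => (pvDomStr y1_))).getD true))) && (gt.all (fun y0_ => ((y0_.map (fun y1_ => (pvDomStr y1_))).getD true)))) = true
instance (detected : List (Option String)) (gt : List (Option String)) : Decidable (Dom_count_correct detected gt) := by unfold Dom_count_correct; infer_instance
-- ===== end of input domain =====

-- B replaces A's interleaved two-index scan with two passes (filter non-None GT, then count equal zipped pairs); return value equivalence proved.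


-- ===== PORT A =====
-- while loop of A: the two indices become the remaining suffixes of gt and detected
def countLoop : List (Option String) → List (Option String) → Int → Int
  | g :: gs, d :: ds, c =>
      if g = none then countLoop gs (d :: ds) c
      else if d = g then countLoop gs ds (c + 1) else countLoop gs ds c
  | _, _, c => c

def count_correct (detected : List (Option String)) (gt : List (Option String)) : Int :=
  countLoop gt detected 0

-- ===== PORT B =====
def count_correct_alt (detected : List (Option String)) (gt : List (Option String)) : Int :=
  let filtered := gt.filterMap id
  ((detected.zip filtered).countP (fun p => p.1 = some p.2) : Nat)

-- ===== PRECONDITION & SPEC =====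
def Spec_count_correct (detected : List (Option String)) (gt : List (Option String)) (out : Int) : Prop := out = count_correct_alt detected gt
instance (detected : List (Option String)) (gt : List (Option String)) (out : Int) : Decidable (Spec_count_correct detected gt out) := by unfold Spec_count_correct; infer_instance

-- ===== CLAIM (what is proved, stated in full; the proofs are below) =====
def Claim_equal_count_correct : Prop := ∀ (detected : List (Option String)) (gt : List (Option String)), Dom_count_correct detected gt → Spec_count_correct detected gt (count_correct detected gt)

-- ===== LEMMAS AND PROOFS =====

-- ===== VERDICT (by name: the statement is the Claim_ definition above) =====
theorem countLoop_eq (gts dets : List (Option String)) (c : Int) :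
    countLoop gts dets c = c + ((dets.zip (gts.filterMap id)).countP (fun p => p.1 = some p.2) : Nat) := by
  induction gts generalizing dets c with
  | nil => simp [countLoop]
  | cons g gs ih =>
    cases dets with
    | nil => cases g <;> simp [countLoop]
    | cons d ds =>
      cases g with
      | none => simpa [countLoop] using ih (d :: ds) c
      | some s =>
        by_cases h : d = some s
        · simp [countLoop, h, ih]; ring
        · simp [countLoop, h, ih]

theorem count_correct_spec : Claim_equal_count_correct := by
  intro detected gt _
  unfold Spec_count_correct count_correct count_correct_alt
  simpa using countLoop_eq gt detected 0
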